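-- pv_equiv track=rewrite | github.com/maulikchevli/cns | python/playfair.py | padded_par
-- ===== SOURCE A (Python) =====
-- def padded_par(plain_text):
-- 	new_text = ""
-- 	j = 1
-- 	while j < len(plain_text):
-- 		c = plain_text[j]
-- 		if c == plain_text[j-1]:
-- 			new_text += plain_text[j-1] + 'x'
-- 			j += 1
-- 		else:
-- 			new_text += plain_text[j-1] + c
-- 			j += 2
--
-- 	return new_text
-- ===== SOURCE B (Python) =====
-- def padded_par(plain_text):
-- 	parts = []
-- 	pending = None
-- 	for c in plain_text:
-- 		if pending is None:
-- 			pending = c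
-- 		elif pending == c:
-- 			parts.append(pending + 'x')
-- 			pending = c
-- 		else:
-- 			parts.append(pending + c)
-- 			pending = None
-- 	return ''.join(parts)
-- ===== Notes on version B (the rewrite author's own statement) =====
-- stated objective: faster
-- what changed: Replaced A's index-jumping while loop (j advancing by 1 or 2 with lookback plain_text[j-1] and quadratic string +=) by a single for-each pass over the characters keeping one pending-character slot, collecting digraphs in a list joined once at the end.
import Mathlib
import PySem

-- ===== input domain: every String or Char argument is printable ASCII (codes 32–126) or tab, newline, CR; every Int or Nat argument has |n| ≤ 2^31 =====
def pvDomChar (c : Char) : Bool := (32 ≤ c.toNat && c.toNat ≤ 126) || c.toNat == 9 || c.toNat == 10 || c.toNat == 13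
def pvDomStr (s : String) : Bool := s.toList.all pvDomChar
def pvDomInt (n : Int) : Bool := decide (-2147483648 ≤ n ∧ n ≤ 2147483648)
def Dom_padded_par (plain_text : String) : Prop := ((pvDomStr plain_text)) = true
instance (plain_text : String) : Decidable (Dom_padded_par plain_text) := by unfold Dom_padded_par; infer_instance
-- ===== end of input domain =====

-- B replaces A's index-jumping while loop by a single for-each pass with one pending-character slot (idiomatic; return value identical).

-- ===== PORT A =====
-- A's while loop: j starts at 1; on a doubled pair append prev+'x' and j += 1, else append both and j += 2.
def pvALoop (cs : List Char) (j : Nat) (acc : List Char) : List Char :=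
  if _h : j < cs.length then
    let c := cs.getD j ' '
    if c == cs.getD (j - 1) ' ' then
      pvALoop cs (j + 1) (acc ++ [cs.getD (j - 1) ' ', 'x'])
    else
      pvALoop cs (j + 2) (acc ++ [cs.getD (j - 1) ' ', c])
  else acc
termination_by cs.length - j

def padded_par (plain_text : String) : String :=
  String.mk (pvALoop plain_text.toList 1 [])

-- ===== PORT B =====
-- one step of B's for loop: state = (collected output, pending slot)
def pvBStep (st : List Char × Option Char) (c : Char) : List Char × Option Char :=
  match st.2 with
  | none => (st.1, some c)
  | some p => if p == c then (st.1 ++ [p, 'x'], some c) else (st.1 ++ [p, c], none)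

def padded_par_alt (plain_text : String) : String :=
  String.mk (plain_text.toList.foldl pvBStep ([], none)).1

-- ===== PRECONDITION & SPEC =====
def Spec_padded_par (plain_text : String) (out : String) : Prop := out = padded_par_alt plain_text
instance (plain_text : String) (out : String) : Decidable (Spec_padded_par plain_text out) := by unfold Spec_padded_par; infer_instance

-- ===== CLAIM (what is proved, stated in full; the proofs are below) =====
def Claim_equal_padded_par : Prop := ∀ (plain_text : String), Dom_padded_par plain_text → Spec_padded_par plain_text (padded_par plain_text)

-- ===== LEMMAS AND PROOFS =====

-- the accumulated output of B's fold factors out of the state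
theorem pvBStep_acc (l : List Char) (acc : List Char) (p : Option Char) :
    (l.foldl pvBStep (acc, p)).1 = acc ++ (l.foldl pvBStep ([], p) ).1 := by
  induction l generalizing acc p with
  | nil => simp
  | cons c t ih =>
    cases p with
    | none => simpa only [List.foldl_cons, pvBStep] using ih acc (some c)
    | some q =>
      by_cases h : (q == c) = true
      · simp only [List.foldl_cons, pvBStep, h, if_true]
        simp [ih (acc ++ [q, 'x']) (some c), ih ([q, 'x']) (some c)]
      · simp only [List.foldl_cons, pvBStep, h]
        simp only [Bool.not_eq_true] at h
        simp only [Bool.false_eq_true, if_false]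
        simp [ih (acc ++ [q, c]) none, ih ([q, c]) none]

-- A's loop at index j equals B's fold over the suffix starting at the pending char cs[j-1]
theorem pvLoop_eq_fold (cs : List Char) (j : Nat) (hj : 1 ≤ j) (acc : List Char) :
    pvALoop cs j acc = acc ++ ((cs.drop (j - 1)).foldl pvBStep ([], none)).1 := by
  by_cases h : j < cs.length
  · have hj1 : j - 1 < cs.length := by omega
    have e1 : j - 1 + 1 = j := by omega
    have hdrop : cs.drop (j - 1) = cs[j - 1] :: cs[j] :: cs.drop (j + 1) := by
      rw [List.drop_eq_getElem_cons hj1, e1, List.drop_eq_getElem_cons h]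
    have hgd : cs.getD j ' ' = cs[j] := List.getD_eq_getElem cs ' ' h
    have hgd1 : cs.getD (j - 1) ' ' = cs[j - 1] := List.getD_eq_getElem cs ' ' hj1
    rw [pvALoop]
    simp only [h, dite_true, hgd, hgd1]
    by_cases heq : cs[j] = cs[j - 1]
    · have hb : (cs[j] == cs[j - 1]) = true := beq_iff_eq.mpr heq
      have hb' : (cs[j - 1] == cs[j]) = true := beq_iff_eq.mpr heq.symm
      simp only [hb, if_true]
      rw [pvLoop_eq_fold cs (j + 1) (by omega), hdrop]
      have e2 : (j + 1) - 1 = j := by omega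
      rw [e2, List.drop_eq_getElem_cons h]
      simp only [List.foldl_cons, pvBStep, hb', if_true]
      simp [pvBStep_acc (cs.drop (j + 1)) ([cs[j - 1], 'x']) (some cs[j])]
    · have hb : (cs[j] == cs[j - 1]) = false := beq_eq_false_iff_ne.mpr heq
      have hb' : (cs[j - 1] == cs[j]) = false :=
        beq_eq_false_iff_ne.mpr (fun e => heq e.symm)
      simp only [hb, Bool.false_eq_true, if_false]
      rw [pvLoop_eq_fold cs (j + 2) (by omega), hdrop]
      have e3 : (j + 2) - 1 = j + 1 := by omega
      rw [e3]
      simp only [List.foldl_cons, pvBStep, hb', Bool.false_eq_true, if_false]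
      simp [pvBStep_acc (cs.drop (j + 1)) ([cs[j - 1], cs[j]]) none]
  · rw [pvALoop]
    simp only [h, dite_false]
    rcases Nat.lt_or_ge (j - 1) cs.length with h1 | h1
    · have hdrop : cs.drop (j - 1) = [cs[j - 1]] := by
        rw [List.drop_eq_getElem_cons h1, List.drop_eq_nil_of_le (by omega)]
      rw [hdrop]
      simp [pvBStep]
    · rw [List.drop_eq_nil_of_le h1]
      simp
termination_by cs.length - j

-- ===== VERDICT (by name: the statement is the Claim_ definition above) =====
theorem padded_par_spec : Claim_equal_padded_par := by
  intro s _
  unfold Spec_padded_par padded_par padded_par_alt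
  rw [pvLoop_eq_fold s.toList 1 (le_refl 1) []]
  simp
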